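-- pv_equiv track=rewrite | github.com/jack-chaudier/stark | scripts/referee/causal_contract_counterexamples.py | ancestors_of_set
-- ===== SOURCE A (Python) =====
-- from typing import Dict, Iterable, List, Sequence, Set, Tuple
--
-- Graph = Dict[str, Set[str]]
--
-- def parents(graph: Graph) -> Dict[str, Set[str]]:
--     rev = {node: set() for node in graph}
--     for src, dests in graph.items():
--         for dst in dests:
--             rev.setdefault(dst, set()).add(src)
--     return rev
--
-- def ancestors_of_set(graph: Graph, nodes: Iterable[str]) -> Set[str]:
--     rev = parents(graph)
--     out: Set[str] = set(nodes)
--     stack = list(nodes)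
--     while stack:
--         node = stack.pop()
--         for par in rev.get(node, set()):
--             if par not in out:
--                 out.add(par)
--                 stack.append(par)
--     return out
-- ===== SOURCE B (Python) =====
-- def ancestors_of_set(graph, nodes):
--     out = set(nodes)
--     stack = list(nodes)
--     while stack:
--         node = stack.pop()
--         for src, dests in graph.items():
--             if node in dests and src not in out:
--                 out.add(src)
--                 stack.append(src)
--     return out
-- ===== Notes on version B (the rewrite author's own statement) =====
-- stated objective: alternative
-- what changed: B deletes the parents() reverse-index dict entirely; each popped node's parents are found by scanning the forward graph inline (src is a parent iff node is in its destination set), keeping the same set/worklist loop.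
import Mathlib
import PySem

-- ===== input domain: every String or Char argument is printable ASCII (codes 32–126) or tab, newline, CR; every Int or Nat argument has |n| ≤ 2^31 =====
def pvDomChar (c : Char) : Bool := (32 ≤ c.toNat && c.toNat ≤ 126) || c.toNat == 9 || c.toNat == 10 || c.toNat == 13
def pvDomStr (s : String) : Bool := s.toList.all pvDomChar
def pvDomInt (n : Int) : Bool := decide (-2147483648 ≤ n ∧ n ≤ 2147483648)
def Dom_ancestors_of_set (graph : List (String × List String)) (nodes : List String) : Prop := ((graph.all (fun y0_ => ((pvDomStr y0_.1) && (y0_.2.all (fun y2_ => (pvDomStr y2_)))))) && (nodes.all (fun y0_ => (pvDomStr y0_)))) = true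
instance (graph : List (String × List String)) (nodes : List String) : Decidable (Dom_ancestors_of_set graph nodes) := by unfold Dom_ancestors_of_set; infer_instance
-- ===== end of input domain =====

-- B removes A's parents() reverse-index dict and finds a popped node's parents by scanning the
-- forward graph inline, keeping the same set/worklist loop (objective: alternative, same output).


-- ===== PORT A =====
-- the body of A's inner loop: 'if par not in out: out.add(par); stack.append(par)'
-- (stack is represented head-as-top, so Python's append-at-the-pop-end is a cons)
def pvPush (st : PySem.Set String × List String) (par : String) : PySem.Set String × List String :=
  if st.1.contains par then st else (PySem.Set.add st.1 par, par :: st.2)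

-- 'while stack: node = stack.pop(); for par in rev.get(node, set()): …'
-- fuel bounds the number of pops; nodes.length + graph.length + 1 is always enough, since every
-- pushed element is a freshly-added graph key.
def pvLoopA (rev : PySem.Dict String (PySem.Set String)) : Nat → PySem.Set String → List String → List String
  | 0, out, _ => out
  | _ + 1, out, [] => out
  | f + 1, out, node :: rest =>
    let st := (PySem.Dict.getD rev node PySem.Set.empty).foldl pvPush (out, rest)
    pvLoopA rev f st.1 st.2

def ancestors_of_set (graph : List (String × List String)) (nodes : List String) : List String :=
  -- rev = parents(graph): rev = {node: set() for node in graph}; then for src,dests: for dst in dests: rev.setdefault(dst,set()).add(src)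
  let rev0 : PySem.Dict String (PySem.Set String) :=
    graph.foldl (fun d p => d.insert p.1 PySem.Set.empty) PySem.Dict.empty
  let rev :=
    graph.foldl (fun d p => p.2.foldl (fun d dst => d.modify dst PySem.Set.empty (fun s => PySem.Set.add s p.1)) d) rev0
  pvLoopA rev (nodes.length + graph.length + 1) (PySem.Set.ofList nodes) nodes.reverse

-- ===== PORT B =====
-- 'while stack: node = stack.pop(); for src, dests in graph.items(): if node in dests and src not in out: …'
def pvLoopB (graph : List (String × List String)) : Nat → PySem.Set String → List String → List String
  | 0, out, _ => out
  | _ + 1, out, [] => out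
  | f + 1, out, node :: rest =>
    let st := graph.foldl
      (fun st p => if p.2.contains node && !(st.1.contains p.1) then (PySem.Set.add st.1 p.1, p.1 :: st.2) else st)
      (out, rest)
    pvLoopB graph f st.1 st.2

def ancestors_of_set_alt (graph : List (String × List String)) (nodes : List String) : List String :=
  pvLoopB graph (nodes.length + graph.length + 1) (PySem.Set.ofList nodes) nodes.reverse

-- ===== PRECONDITION & SPEC =====
def Spec_ancestors_of_set (graph : List (String × List String)) (nodes : List String) (out : List String) : Prop := out = ancestors_of_set_alt graph nodes
instance (graph : List (String × List String)) (nodes : List String) (out : List String) : Decidable (Spec_ancestors_of_set graph nodes out) := by unfold Spec_ancestors_of_set; infer_instance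

-- ===== CLAIM (what is proved, stated in full; the proofs are below) =====
def Claim_equal_ancestors_of_set : Prop := ∀ (graph : List (String × List String)) (nodes : List String), Dom_ancestors_of_set graph nodes → Spec_ancestors_of_set graph nodes (ancestors_of_set graph nodes)

-- ===== LEMMAS AND PROOFS =====

-- B's inline scan is pvPush folded over the sources whose destination set contains node
lemma foldB_eq (node : String) : ∀ (graph : List (String × List String)) (st : PySem.Set String × List String),
    graph.foldl (fun st p => if p.2.contains node && !(st.1.contains p.1) then (PySem.Set.add st.1 p.1, p.1 :: st.2) else st) st
      = ((graph.filter (fun p => p.2.contains node)).map (·.1)).foldl pvPush st := by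
  intro graph
  induction graph with
  | nil => intro st; rfl
  | cons p rest ih =>
    intro st
    simp only [List.foldl_cons, List.filter_cons]
    by_cases h : p.2.contains node = true
    · rw [if_pos h]
      have hstep : (if (p.2.contains node && !(st.1.contains p.1)) = true then (PySem.Set.add st.1 p.1, p.1 :: st.2) else st) = pvPush st p.1 := by
        have hm : node ∈ p.2 := by simpa using h
        by_cases h2 : p.1 ∈ st.1 <;> simp [pvPush, hm, h2]
      rw [hstep, List.map_cons, List.foldl_cons, ih]
    · have hm : node ∉ p.2 := by simpa using h
      simpa [hm] using ih st

lemma pvAddIdem (s : PySem.Set String) (x : String) : PySem.Set.add (PySem.Set.add s x) x = PySem.Set.add s x := by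
  by_cases h : x ∈ s <;> simp [PySem.Set.add, h]

-- the inner dest loop of parents(): it adds src to rev[node] iff node ∈ dests
lemma inner_rev (src node : String) : ∀ (dests : List String) (d : PySem.Dict String (PySem.Set String)),
    (dests.foldl (fun d dst => d.modify dst PySem.Set.empty (fun s => PySem.Set.add s src)) d).getD node PySem.Set.empty
      = if dests.contains node then PySem.Set.add (d.getD node PySem.Set.empty) src else d.getD node PySem.Set.empty := by
  intro dests
  induction dests with
  | nil => intro d; simp
  | cons dst rest ih =>
    intro d
    rw [List.foldl_cons, ih]
    by_cases h : dst = node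
    · subst h
      rw [PySem.Dict.getD_modify_self]
      by_cases hr : rest.contains dst = true
      · rw [if_pos hr, if_pos (by simp), pvAddIdem]
      · rw [if_neg hr, if_pos (by simp)]
    · have hne : node ≠ dst := fun hh => h hh.symm
      rw [PySem.Dict.getD_modify_of_ne _ _ _ hne]
      by_cases hr : rest.contains node = true
      · have hin : (dst :: rest).contains node = true :=
          List.contains_iff_mem.mpr (List.mem_cons.mpr (Or.inr (List.contains_iff_mem.mp hr)))
        rw [if_pos hr, if_pos hin]
      · have hout : ¬ ((dst :: rest).contains node = true) := by
          intro hc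
          rcases List.mem_cons.mp (List.contains_iff_mem.mp hc) with h1 | h2
          · exact hne h1
          · exact hr (List.contains_iff_mem.mpr h2)
        rw [if_neg hr, if_neg hout]

-- the full parents() accumulation
lemma rev_getD (node : String) : ∀ (graph : List (String × List String)) (d : PySem.Dict String (PySem.Set String)),
    (graph.foldl (fun d p => p.2.foldl (fun d dst => d.modify dst PySem.Set.empty (fun s => PySem.Set.add s p.1)) d) d).getD node PySem.Set.empty
      = ((graph.filter (fun p => p.2.contains node)).map (·.1)).foldl PySem.Set.add (d.getD node PySem.Set.empty) := by
  intro graph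
  induction graph with
  | nil => intro d; rfl
  | cons p rest ih =>
    intro d
    rw [List.foldl_cons, ih, inner_rev, List.filter_cons]
    by_cases h : p.2.contains node = true
    · rw [if_pos h, if_pos h, List.map_cons, List.foldl_cons]
    · rw [if_neg h, if_neg h]

lemma rev0_getD (node : String) : ∀ (graph : List (String × List String)) (d : PySem.Dict String (PySem.Set String)),
    d.getD node PySem.Set.empty = PySem.Set.empty →
    (graph.foldl (fun d p => d.insert p.1 PySem.Set.empty) d).getD node PySem.Set.empty = PySem.Set.empty := by
  intro graph
  induction graph with
  | nil => intro d h; simpa using h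
  | cons p rest ih =>
    intro d h
    apply ih
    by_cases hk : node = p.1
    · subst hk; simp [PySem.Dict.getD_insert_self]
    · rw [PySem.Dict.getD_insert_of_ne _ _ _ hk]; exact h

-- out only grows through the push loop
lemma mem_foldl_pvPush (q : String) : ∀ (l : List String) (st : PySem.Set String × List String),
    q ∈ st.1 → q ∈ (l.foldl pvPush st).1 := by
  intro l
  induction l with
  | nil => intro st h; exact h
  | cons x rest ih =>
    intro st h
    apply ih
    by_cases hc : x ∈ st.1
    · simpa [pvPush, hc] using h
    · have hp : pvPush st x = (PySem.Set.add st.1 x, x :: st.2) := by simp [pvPush, hc]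
      rw [hp]
      exact (PySem.Set.mem_add st.1 x q).mpr (Or.inl h)

-- every processed element ends up in out
lemma processed_mem (x : String) : ∀ (l : List String) (st : PySem.Set String × List String),
    x ∈ l → x ∈ (l.foldl pvPush st).1 := by
  intro l
  induction l with
  | nil => intro st h; cases h
  | cons y rest ih =>
    intro st h
    rcases List.mem_cons.mp h with h | h
    · subst h
      rw [List.foldl_cons]
      apply mem_foldl_pvPush
      by_cases hc : x ∈ st.1
      · simp [pvPush, hc]
      · have hp : pvPush st x = (PySem.Set.add st.1 x, x :: st.2) := by simp [pvPush, hc]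
        rw [hp]
        exact (PySem.Set.mem_add st.1 x x).mpr (Or.inr rfl)
    · exact ih _ h

-- duplicates are no-ops: folding pvPush over set(l) equals folding it over l
lemma foldl_pvPush_ofList : ∀ (l : List String) (st : PySem.Set String × List String),
    (PySem.Set.ofList l).foldl pvPush st = l.foldl pvPush st := by
  intro l
  induction l using List.reverseRecOn with
  | nil => intro st; rfl
  | append_singleton l x ih =>
    intro st
    have hof : PySem.Set.ofList (l ++ [x]) = PySem.Set.add (PySem.Set.ofList l) x := by
      simp [PySem.Set.ofList_eq_foldl, List.foldl_append]
    by_cases h : x ∈ l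
    · have hmem : x ∈ PySem.Set.ofList l := (PySem.Set.mem_ofList l x).mpr h
      have hadd : PySem.Set.add (PySem.Set.ofList l) x = PySem.Set.ofList l := by
        simp [PySem.Set.add, hmem]
      have hx : x ∈ (l.foldl pvPush st).1 := processed_mem x l st h
      have hpush : pvPush (l.foldl pvPush st) x = l.foldl pvPush st := by
        simp [pvPush, hx]
      rw [hof, hadd, ih, List.foldl_append, List.foldl_cons, List.foldl_nil, hpush]
    · have hmem : x ∉ PySem.Set.ofList l := fun hh => h ((PySem.Set.mem_ofList l x).mp hh)
      have hadd : PySem.Set.add (PySem.Set.ofList l) x = PySem.Set.ofList l ++ [x] := by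
        simp [PySem.Set.add, hmem]
      rw [hof, hadd, List.foldl_append, List.foldl_append, List.foldl_cons, List.foldl_cons,
        List.foldl_nil, List.foldl_nil, ih]

-- the two worklist loops agree step for step
lemma loop_eq (graph : List (String × List String)) : ∀ (f : Nat) (out : PySem.Set String) (stack : List String),
    pvLoopA (graph.foldl (fun d p => p.2.foldl (fun d dst => d.modify dst PySem.Set.empty (fun s => PySem.Set.add s p.1)) d)
        (graph.foldl (fun d p => d.insert p.1 PySem.Set.empty) PySem.Dict.empty)) f out stack
      = pvLoopB graph f out stack := by
  intro f
  induction f with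
  | zero => intro out stack; rfl
  | succ f ih =>
    intro out stack
    cases stack with
    | nil => rfl
    | cons node rest =>
      simp only [pvLoopA, pvLoopB]
      have hrev : (graph.foldl (fun d p => p.2.foldl (fun d dst => d.modify dst PySem.Set.empty (fun s => PySem.Set.add s p.1)) d)
            (graph.foldl (fun d p => d.insert p.1 PySem.Set.empty) PySem.Dict.empty)).getD node PySem.Set.empty
          = PySem.Set.ofList (((graph.filter (fun p => p.2.contains node)).map (·.1))) := by
        rw [rev_getD]
        rw [rev0_getD node graph PySem.Dict.empty (by simp)]
        simp [PySem.Set.ofList_eq_foldl, PySem.Set.empty]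
      rw [hrev, foldl_pvPush_ofList, ← foldB_eq, ih]

-- ===== VERDICT (by name: the statement is the Claim_ definition above) =====
theorem ancestors_of_set_spec : Claim_equal_ancestors_of_set := by
  intro graph nodes _
  unfold Spec_ancestors_of_set ancestors_of_set ancestors_of_set_alt
  exact loop_eq graph _ _ _
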